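-- pv_equiv track=rewrite | github.com/oernster/crankthecode | app/domain/tags.py | normalize_layer_slug
-- ===== SOURCE A (Python) =====
-- def normalize_layer_slug(raw_slug: str) -> str:
--     """Normalize a `layer:` slug into kebab-case."""
--
--     raw = (raw_slug or "").strip().lower()
--     if not raw:
--         return ""
--
--     if (
--         raw.replace("-", "").isalnum()
--         and "--" not in raw
--         and not raw.startswith("-")
--         and not raw.endswith("-")
--     ):
--         return raw
--
--     out_chars: list[str] = []
--     prev_dash = False
--     for ch in raw:
--         if ch.isalnum():
--             out_chars.append(ch)
--             prev_dash = False
--             continue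
--         if ch in {" ", "_", "-"}:
--             if not prev_dash and out_chars:
--                 out_chars.append("-")
--                 prev_dash = True
--             continue
--
--     return "".join(out_chars).strip("-")
-- ===== SOURCE B (Python) =====
-- def normalize_layer_slug(raw_slug: str) -> str:
--     """Normalize a `layer:` slug into kebab-case.
--
--     Two phases: map every char independently (alnum kept, separators to '-',
--     anything else dropped), then collapse dash runs right-to-left and strip
--     edge dashes.
--     """
--     raw = (raw_slug or "").strip().lower()
--     mapped = "".join(
--         c if c.isalnum() else ("-" if c in " _-" else "") for c in raw
--     )
--     collapsed = []
--     for ch in reversed(mapped):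
--         if ch != "-" or not (collapsed and collapsed[-1] == "-"):
--             collapsed.append(ch)
--     return "".join(reversed(collapsed)).strip("-")
-- ===== Notes on version B (the rewrite author's own statement) =====
-- stated objective: simpler
-- what changed: Replaces A's fast-path early return plus single stateful forward loop (prev_dash flag, emptiness check) by two independent phases: a per-character map (alnum kept, separators to '-', others dropped) followed by a right-to-left collapse of dash runs and an edge strip.
import Mathlib
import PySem

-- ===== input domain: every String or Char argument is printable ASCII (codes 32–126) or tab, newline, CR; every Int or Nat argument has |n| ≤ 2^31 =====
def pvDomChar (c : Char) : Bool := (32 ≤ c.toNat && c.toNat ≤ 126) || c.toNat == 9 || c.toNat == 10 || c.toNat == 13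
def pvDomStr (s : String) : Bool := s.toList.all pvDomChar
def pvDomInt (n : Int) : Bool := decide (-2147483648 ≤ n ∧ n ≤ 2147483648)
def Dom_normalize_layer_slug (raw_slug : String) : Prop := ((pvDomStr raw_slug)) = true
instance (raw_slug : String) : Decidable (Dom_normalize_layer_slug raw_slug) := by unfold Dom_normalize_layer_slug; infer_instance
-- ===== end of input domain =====

-- B replaces A's fast path + stateful forward loop by a per-char map phase, a right-to-left
-- dash-run collapse and an edge strip (objective: simpler decomposition; same cost).

-- ===== PORT A =====
-- the for-loop over `raw` with state (out_chars, prev_dash)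
def normAgo : List Char → List Char → Bool → List Char
  | [], out, _ => out
  | c :: cs, out, prev =>
    if PySem.Chars.isalnum c then normAgo cs (out ++ [c]) false
    else if c = ' ' ∨ c = '_' ∨ c = '-' then
      if !prev && !out.isEmpty then normAgo cs (out ++ ['-']) true
      else normAgo cs out prev
    else normAgo cs out prev

def normalize_layer_slug (raw_slug : String) : String :=
  let s0 := raw_slug.toList
  let base := if s0.isEmpty then [] else s0          -- (raw_slug or "")
  let raw := PySem.Chars.lower (PySem.Chars.strip base)
  if raw.isEmpty then "" else
  if PySem.Chars.strIsalnum (PySem.Chars.replace raw ['-'] [])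
      && !(PySem.Chars.isIn ['-', '-'] raw)
      && !(PySem.Chars.startswith raw ['-'])
      && !(PySem.Chars.endswith raw ['-'])
  then String.ofList raw
  else String.ofList (PySem.Chars.stripChars (normAgo raw [] false) ['-'])

-- ===== PORT B =====
-- phase 1: per-character map (alnum kept, separator → '-', others dropped)
def altMap (c : Char) : List Char :=
  if PySem.Chars.isalnum c then [c]
  else if c = ' ' ∨ c = '_' ∨ c = '-' then ['-']
  else []

-- phase 2: the loop over reversed(mapped), appending to `collapsed`
def altStep (acc : List Char) (c : Char) : List Char :=
  if c ≠ '-' ∨ ¬ (acc ≠ [] ∧ acc.getLast? = some '-') then acc ++ [c] else acc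

def normalize_layer_slug_alt (raw_slug : String) : String :=
  let s0 := raw_slug.toList
  let base := if s0.isEmpty then [] else s0          -- (raw_slug or "")
  let raw := PySem.Chars.lower (PySem.Chars.strip base)
  let mapped := raw.flatMap altMap                   -- "".join(… for c in raw)
  let collapsed := mapped.reverse.foldl altStep []   -- for ch in reversed(mapped)
  String.ofList (PySem.Chars.stripChars collapsed.reverse ['-'])

-- ===== PRECONDITION & SPEC =====
def Spec_normalize_layer_slug (raw_slug : String) (out : String) : Prop := out = normalize_layer_slug_alt raw_slug
instance (raw_slug : String) (out : String) : Decidable (Spec_normalize_layer_slug raw_slug out) := by unfold Spec_normalize_layer_slug; infer_instance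

-- ===== CLAIM (what is proved, stated in full; the proofs are below) =====
def Claim_equal_normalize_layer_slug : Prop := ∀ (raw_slug : String), Dom_normalize_layer_slug raw_slug → Spec_normalize_layer_slug raw_slug (normalize_layer_slug raw_slug)

-- ===== LEMMAS AND PROOFS =====

-- A's loop residual: what the loop appends beyond `out`, as a function of
-- e = "out is nonempty" and p = prev_dash
def rres : List Char → Bool → Bool → List Char
  | [], _, _ => []
  | c :: cs, e, p =>
    if PySem.Chars.isalnum c then c :: rres cs true false
    else if c = ' ' ∨ c = '_' ∨ c = '-' then
      if !p && e then '-' :: rres cs true true else rres cs e p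
    else rres cs e p

def dropDash (xs : List Char) : List Char := xs.dropWhile (fun c => c = '-')

-- proof-side view of phase 2: the same collapse written as a foldr building the
-- output front-to-back
def altCollapse (xs : List Char) : List Char :=
  xs.foldr (fun c s => if c ≠ '-' ∨ !(PySem.Chars.startswith s ['-']) then c :: s else s) []

theorem alnum_ne_dash {c : Char} (h : PySem.Chars.isalnum c = true) : c ≠ '-' := by
  intro hc; subst hc; exact absurd h (by decide)

theorem sw_dash_iff (s : List Char) :
    PySem.Chars.startswith s ['-'] = true ↔ s.head? = some '-' := by
  cases s with
  | nil => simp [PySem.Chars.startswith, List.isPrefixOf]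
  | cons c t =>
    by_cases h : c = '-'
    · subst h; simp [PySem.Chars.startswith, List.isPrefixOf]
    · simp [PySem.Chars.startswith, List.isPrefixOf, h, Ne.symm h]

theorem head_dash_ex {s : List Char} (h : s.head? = some '-') : ∃ t, s = '-' :: t := by
  cases s with
  | nil => simp at h
  | cons x xs => simp at h; subst h; exact ⟨xs, rfl⟩

theorem dropDash_cons_dash (l : List Char) : dropDash ('-' :: l) = dropDash l := by
  simp [dropDash, List.dropWhile]

theorem dropDash_cons_ne {c : Char} (h : c ≠ '-') (l : List Char) :
    dropDash (c :: l) = c :: l := by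
  simp [dropDash, List.dropWhile, h]

theorem dropDash_of_head_ne {l : List Char} (h : l.head? ≠ some '-') :
    dropDash l = l := by
  cases l with
  | nil => simp [dropDash]
  | cons c t =>
    have : c ≠ '-' := by intro hc; subst hc; simp at h
    exact dropDash_cons_ne this t

theorem altCollapse_cons (c : Char) (xs : List Char) :
    altCollapse (c :: xs) =
      if c ≠ '-' ∨ !(PySem.Chars.startswith (altCollapse xs) ['-']) then
        c :: altCollapse xs else altCollapse xs := rfl

theorem altStep_foldl_eq (xs : List Char) :
    xs.reverse.foldl altStep [] = (altCollapse xs).reverse := by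
  induction xs with
  | nil => rfl
  | cons c t ih =>
    rw [List.reverse_cons, List.foldl_append, List.foldl_cons, List.foldl_nil, ih,
      altCollapse_cons]
    by_cases hsw : PySem.Chars.startswith (altCollapse t) ['-'] = true
    · by_cases hc : c = '-'
      · obtain ⟨t', ht'⟩ := head_dash_ex ((sw_dash_iff _).mp hsw)
        subst hc
        rw [if_neg (by simp [hsw])]
        simp only [altStep]
        rw [if_neg]
        rintro (hne | hnot)
        · exact hne rfl
        · apply hnot
          constructor
          · simp [ht']
          · rw [List.getLast?_reverse, ht']
            rfl
      · rw [if_pos (Or.inl hc)]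
        simp only [altStep]
        rw [if_pos (Or.inl hc), List.reverse_cons]
    · rw [if_pos (Or.inr (by simp [Bool.eq_false_iff.mpr hsw]))]
      simp only [altStep]
      rw [if_pos, List.reverse_cons]
      right
      rintro ⟨-, hlast⟩
      rw [List.getLast?_reverse] at hlast
      exact hsw ((sw_dash_iff _).mpr hlast)

theorem normAgo_eq_rres (cs : List Char) : ∀ out prev,
    normAgo cs out prev = out ++ rres cs (!out.isEmpty) prev := by
  induction cs with
  | nil => intro out prev; simp [normAgo, rres]
  | cons c cs ih =>
    intro out prev
    by_cases ha : PySem.Chars.isalnum c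
    · have e1 : normAgo (c :: cs) out prev = normAgo cs (out ++ [c]) false := by
        simp [normAgo, ha]
      have e2 : rres (c :: cs) (!out.isEmpty) prev = c :: rres cs true false := by
        simp only [rres]
        rw [if_pos ha]
      have h3 : (out ++ [c]).isEmpty = false := by cases out <;> simp
      rw [e1, ih, e2, h3]
      simp
    · by_cases hs : c = ' ' ∨ c = '_' ∨ c = '-'
      · by_cases hp : (!prev && !out.isEmpty) = true
        · have e1 : normAgo (c :: cs) out prev = normAgo cs (out ++ ['-']) true := by
            simp [normAgo, ha, hs, hp]
          have e2 : rres (c :: cs) (!out.isEmpty) prev = '-' :: rres cs true true := by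
            simp only [rres]
            rw [if_neg ha, if_pos hs, if_pos hp]
          have h3 : (out ++ ['-']).isEmpty = false := by cases out <;> simp
          rw [e1, ih, e2, h3]
          simp
        · have e1 : normAgo (c :: cs) out prev = normAgo cs out prev := by
            simp [normAgo, ha, hs, hp]
          have e2 : rres (c :: cs) (!out.isEmpty) prev = rres cs (!out.isEmpty) prev := by
            simp [rres, ha, hs, hp]
          rw [e1, ih, e2]
      · have e1 : normAgo (c :: cs) out prev = normAgo cs out prev := by
          simp [normAgo, ha, hs]
        have e2 : rres (c :: cs) (!out.isEmpty) prev = rres cs (!out.isEmpty) prev := by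
          simp [rres, ha, hs]
        rw [e1, ih, e2]

theorem rres_ff_eq_tt (cs : List Char) : rres cs false false = rres cs true true := by
  induction cs with
  | nil => rfl
  | cons c cs ih =>
    by_cases ha : PySem.Chars.isalnum c
    · simp [rres, ha]
    · by_cases hs : c = ' ' ∨ c = '_' ∨ c = '-'
      · simp [rres, ha, hs, ih]
      · simp [rres, ha, hs, ih]

theorem altCollapse_no_dd (xs : List Char) :
    ∀ t, altCollapse xs = '-' :: t → t.head? ≠ some '-' := by
  induction xs with
  | nil => intro t h; simp [altCollapse] at h
  | cons c cs ih =>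
    intro t h
    rw [altCollapse_cons] at h
    split at h
    · rename_i hcond
      obtain ⟨hc, ht⟩ := List.cons_eq_cons.mp h
      subst hc; subst ht
      rcases hcond with hne | hsw
      · exact absurd rfl hne
      · intro hh
        have h1 := (sw_dash_iff (altCollapse cs)).mpr hh
        rw [h1] at hsw
        simp at hsw
    · exact ih t h

theorem rres_collapse (cs : List Char) :
    rres cs true false = altCollapse (cs.flatMap altMap) ∧
    rres cs true true = dropDash (altCollapse (cs.flatMap altMap)) := by
  induction cs with
  | nil => simp [rres, altCollapse, dropDash]
  | cons c cs ih =>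
    obtain ⟨ih1, ih2⟩ := ih
    by_cases ha : PySem.Chars.isalnum c
    · have hne : c ≠ '-' := alnum_ne_dash ha
      have hfm : (c :: cs).flatMap altMap = c :: cs.flatMap altMap := by
        simp [altMap, ha]
      have hcol : altCollapse (c :: cs.flatMap altMap) =
          c :: altCollapse (cs.flatMap altMap) := by
        rw [altCollapse_cons, if_pos (Or.inl hne)]
      constructor
      · simp [rres, ha, ih1, hfm, hcol]
      · simp [rres, ha, ih1, hfm, hcol, dropDash_cons_ne hne]
    · by_cases hs : c = ' ' ∨ c = '_' ∨ c = '-'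
      · have hfm : (c :: cs).flatMap altMap = '-' :: cs.flatMap altMap := by
          simp [altMap, ha, hs]
        by_cases hsw : PySem.Chars.startswith (altCollapse (cs.flatMap altMap)) ['-'] = true
        · have hcol : altCollapse ('-' :: cs.flatMap altMap) =
              altCollapse (cs.flatMap altMap) := by
            rw [altCollapse_cons, if_neg]
            simp [hsw]
          obtain ⟨t, ht⟩ := head_dash_ex ((sw_dash_iff _).mp hsw)
          have hhd := altCollapse_no_dd (cs.flatMap altMap) t ht
          constructor
          · rw [hfm, hcol]
            simp only [rres]
            rw [if_neg ha, if_pos hs, if_pos (show (!false && true) = true by decide)]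
            rw [ih2, ht, dropDash_cons_dash, dropDash_of_head_ne hhd]
          · rw [hfm, hcol]
            simp only [rres]
            rw [if_neg ha, if_pos hs, if_neg (show ¬ ((!true && true) = true) by decide)]
            exact ih2
        · have hcol : altCollapse ('-' :: cs.flatMap altMap) =
              '-' :: altCollapse (cs.flatMap altMap) := by
            rw [altCollapse_cons, if_pos]
            right
            simp [Bool.eq_false_iff.mpr hsw]
          have hhd : (altCollapse (cs.flatMap altMap)).head? ≠ some '-' := by
            intro hh; exact hsw ((sw_dash_iff _).mpr hh)
          constructor
          · rw [hfm, hcol]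
            simp only [rres]
            rw [if_neg ha, if_pos hs, if_pos (show (!false && true) = true by decide)]
            rw [ih2, dropDash_of_head_ne hhd]
          · rw [hfm, hcol]
            simp only [rres]
            rw [if_neg ha, if_pos hs, if_neg (show ¬ ((!true && true) = true) by decide)]
            rw [ih2, dropDash_cons_dash]
      · have hfm : (c :: cs).flatMap altMap = cs.flatMap altMap := by
          simp [altMap, ha, hs]
        constructor
        · simp [rres, ha, hs, ih1, hfm]
        · simp [rres, ha, hs, ih2, hfm]

theorem dropWhile_contains_eq (xs : List Char) :
    List.dropWhile (fun c => (['-'] : List Char).contains c) xs = dropDash xs := by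
  have hp : (fun c => (['-'] : List Char).contains c) = (fun c : Char => decide (c = '-')) := by
    funext c
    by_cases h : c = '-' <;> simp [h]
  rw [hp]; rfl

theorem dropDash_idem (xs : List Char) : dropDash (dropDash xs) = dropDash xs := by
  induction xs with
  | nil => rfl
  | cons c t ih =>
    by_cases h : c = '-'
    · subst h; rw [dropDash_cons_dash]; exact ih
    · rw [dropDash_cons_ne h, dropDash_cons_ne h]

theorem stripChars_dropDash (xs : List Char) :
    PySem.Chars.stripChars (dropDash xs) ['-'] = PySem.Chars.stripChars xs ['-'] := by
  simp only [PySem.Chars.stripChars, dropWhile_contains_eq, dropDash_idem]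

theorem replace_go_dash : ∀ (fuel : Nat) (l acc : List Char), l.length ≤ fuel →
    PySem.Chars.replace.go ['-'] [] fuel l acc = acc.reverse ++ l.filter (fun c => c ≠ '-') := by
  intro fuel
  induction fuel with
  | zero =>
    intro l acc hl
    have hnil : l = [] := List.eq_nil_of_length_eq_zero (Nat.le_zero.mp hl)
    subst hnil
    simp [PySem.Chars.replace.go]
  | succ n ih =>
    intro l acc hl
    cases l with
    | nil => simp [PySem.Chars.replace.go]
    | cons c t =>
      by_cases h : c = '-'
      · subst h
        have hpre : List.isPrefixOf ['-'] ('-' :: t) = true := by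
          simp [List.isPrefixOf]
        simp only [PySem.Chars.replace.go, hpre, if_pos]
        have hd : List.drop (['-'] : List Char).length ('-' :: t) = t := rfl
        rw [hd]
        simp only [List.length_cons] at hl
        simp only [List.reverse_nil, List.nil_append]
        rw [ih t acc (Nat.le_of_succ_le_succ hl)]
        simp [List.filter]
      · have hpre : List.isPrefixOf ['-'] (c :: t) = false := by
          simp [List.isPrefixOf]
          intro hc; exact absurd hc.symm h
        simp only [PySem.Chars.replace.go, hpre]
        simp only [List.length_cons] at hl
        rw [ih t (c :: acc) (Nat.le_of_succ_le_succ hl)]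
        simp [List.filter, h]

theorem replace_dash (cs : List Char) :
    PySem.Chars.replace cs ['-'] [] = cs.filter (fun c => c ≠ '-') := by
  simp only [PySem.Chars.replace]
  rw [if_neg (by simp)]
  simpa using replace_go_dash cs.length cs [] (Nat.le_refl _)

theorem flatMap_altMap_id (cs : List Char) (h : ∀ c ∈ cs, PySem.Chars.isalnum c = true ∨ c = '-') :
    cs.flatMap altMap = cs := by
  induction cs with
  | nil => rfl
  | cons c t ih =>
    have hc := h c (by simp)
    have ht := ih (fun x hx => h x (by simp [hx]))
    rcases hc with ha | hd
    · simp [altMap, ha, ht]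
    · subst hd
      simp [altMap, ht]

theorem altCollapse_id (cs : List Char) (h : ¬ ['-', '-'] <:+: cs) :
    altCollapse cs = cs := by
  induction cs with
  | nil => rfl
  | cons c t ih =>
    have ht : ¬ ['-', '-'] <:+: t := by
      intro hinf
      exact h (hinf.trans (List.suffix_cons c t).isInfix)
    have ihe := ih ht
    rw [altCollapse_cons, ihe]
    by_cases hsw : PySem.Chars.startswith t ['-'] = true
    · obtain ⟨t', ht'⟩ := head_dash_ex ((sw_dash_iff _).mp hsw)
      by_cases hc : c = '-'
      · exfalso
        apply h
        rw [hc, ht']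
        exact List.IsPrefix.isInfix ⟨t', rfl⟩
      · rw [if_pos (Or.inl hc)]
    · rw [if_pos (Or.inr (by simp [Bool.eq_false_iff.mpr hsw]))]

theorem stripChars_id (cs : List Char) (h1 : cs.head? ≠ some '-')
    (h2 : cs.reverse.head? ≠ some '-') :
    PySem.Chars.stripChars cs ['-'] = cs := by
  simp only [PySem.Chars.stripChars, dropWhile_contains_eq]
  rw [dropDash_of_head_ne h1, dropDash_of_head_ne h2, List.reverse_reverse]

theorem main_loop_eq (cs : List Char) :
    PySem.Chars.stripChars (normAgo cs [] false) ['-'] =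
    PySem.Chars.stripChars (altCollapse (cs.flatMap altMap)) ['-'] := by
  have h1 : normAgo cs [] false = rres cs false false := by
    simpa using normAgo_eq_rres cs [] false
  rw [h1, rres_ff_eq_tt, (rres_collapse cs).2, stripChars_dropDash]

-- ===== VERDICT (by name: the statement is the Claim_ definition above) =====
theorem normalize_layer_slug_spec : Claim_equal_normalize_layer_slug := by
  intro s _
  show normalize_layer_slug s = normalize_layer_slug_alt s
  simp only [normalize_layer_slug, normalize_layer_slug_alt]
  generalize PySem.Chars.lower (PySem.Chars.strip (if s.toList.isEmpty then [] else s.toList)) = raw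
  rw [altStep_foldl_eq, List.reverse_reverse]
  by_cases he : raw.isEmpty = true
  · have h0 : raw = [] := List.isEmpty_iff.mp he
    subst h0
    rw [if_pos he]
    rfl
  · rw [if_neg he]
    by_cases hg : (PySem.Chars.strIsalnum (PySem.Chars.replace raw ['-'] [])
        && !(PySem.Chars.isIn ['-', '-'] raw)
        && !(PySem.Chars.startswith raw ['-'])
        && !(PySem.Chars.endswith raw ['-'])) = true
    · rw [if_pos hg]
      simp only [Bool.and_eq_true, Bool.not_eq_true'] at hg
      obtain ⟨⟨⟨han, hdd⟩, hsw⟩, hew⟩ := hg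
      have hall : ∀ c ∈ raw, PySem.Chars.isalnum c = true ∨ c = '-' := by
        intro c hc
        by_cases hcd : c = '-'
        · exact Or.inr hcd
        · left
          rw [replace_dash] at han
          simp only [PySem.Chars.strIsalnum, Bool.and_eq_true, List.all_eq_true] at han
          exact han.2 c (List.mem_filter.mpr ⟨hc, by simp [hcd]⟩)
      have hinf : ¬ ['-', '-'] <:+: raw := by
        rw [← PySem.Chars.isIn_eq_false_iff]; exact hdd
      have hh1 : raw.head? ≠ some '-' := by
        intro hh
        have h1 := (sw_dash_iff raw).mpr hh
        rw [h1] at hsw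
        simp at hsw
      have hh2 : raw.reverse.head? ≠ some '-' := by
        intro hh
        obtain ⟨t, ht⟩ := head_dash_ex hh
        have hpre : (['-'] : List Char).reverse <+: raw.reverse := by
          rw [ht]
          exact ⟨t, rfl⟩
        have hsuf : ['-'] <:+ raw := List.reverse_prefix.mp hpre
        have h1 : PySem.Chars.endswith raw ['-'] = true := by
          rw [PySem.Chars.endswith_iff]; exact hsuf
        rw [h1] at hew
        simp at hew
      rw [flatMap_altMap_id raw hall, altCollapse_id raw hinf, stripChars_id raw hh1 hh2]
    · rw [if_neg hg]
      rw [main_loop_eq]
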